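-- pv_equiv track=rewrite | github.com/ptrebert/reference-data | scripts/process_genomes.py | chrom_karyo_sort
-- ===== SOURCE A (Python) =====
-- def check_special_chroms(name):
--     """
--     :param name:
--     :return:
--     """
--     # check for chimp exceptions
--     if name in ['chr2A', '2A', '2a', 'chr2a']:
--         return 21
--     elif name in ['chr2B', '2B', '2b', 'chr2b']:
--         return 22
--     elif name in ['chrX', 'X', 'chrZ', 'Z']:
--         return 1000
--     elif name in ['chrY', 'Y', 'chrW', 'W']:
--         return 2000
--     elif name in ['chrM', 'M', 'chrMT', 'MT']:
--         return 3000
--     elif name in ['hs37d5']: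
--         return 4000
--     else:
--         return -1
--
-- def chrom_karyo_sort(chroms):
--     """
--     :param chroms:
--     :return:
--     """
--     ordered = []
--     unordered = []
--     for cname, size in chroms:
--         try:
--             ord = int(cname.lower().strip('chr'))
--             ordered.append((cname, size, ord * 10))
--         except ValueError:
--             ord = check_special_chroms(cname)
--             if ord > 0:
--                 ordered.append((cname, size, ord))
--             else:
--                 unordered.append((cname, size, -1))
--     unordered = sorted(unordered, key=lambda x: x[1], reverse=True)
--     ordered = sorted(ordered, key=lambda x: x[2])
--     ordered.extend(unordered)
--     return [(t[0], t[1]) for t in ordered]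
-- ===== SOURCE B (Python) =====
-- def check_special_chroms(name):
--     if name in ['chr2A', '2A', '2a', 'chr2a']:
--         return 21
--     elif name in ['chr2B', '2B', '2b', 'chr2b']:
--         return 22
--     elif name in ['chrX', 'X', 'chrZ', 'Z']:
--         return 1000
--     elif name in ['chrY', 'Y', 'chrW', 'W']:
--         return 2000
--     elif name in ['chrM', 'M', 'chrMT', 'MT']:
--         return 3000
--     elif name in ['hs37d5']:
--         return 4000
--     else:
--         return -1
--
-- def chrom_karyo_sort(chroms):
--     def key(item):
--         cname, size = item
--         try:
--             return (0, int(cname.lower().strip('chr')) * 10)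
--         except ValueError:
--             spec = check_special_chroms(cname)
--             return (0, spec) if spec > 0 else (1, -size)
--     return [(cname, size) for cname, size in sorted(chroms, key=key)]
-- ===== Notes on version B (the rewrite author's own statement) =====
-- stated objective: simpler
-- what changed: Replaces the two accumulator lists, two separate sorts and concatenation with a single stable sorted() over the input keyed by a composite (group, secondary) tuple computed per element.
import Mathlib
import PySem

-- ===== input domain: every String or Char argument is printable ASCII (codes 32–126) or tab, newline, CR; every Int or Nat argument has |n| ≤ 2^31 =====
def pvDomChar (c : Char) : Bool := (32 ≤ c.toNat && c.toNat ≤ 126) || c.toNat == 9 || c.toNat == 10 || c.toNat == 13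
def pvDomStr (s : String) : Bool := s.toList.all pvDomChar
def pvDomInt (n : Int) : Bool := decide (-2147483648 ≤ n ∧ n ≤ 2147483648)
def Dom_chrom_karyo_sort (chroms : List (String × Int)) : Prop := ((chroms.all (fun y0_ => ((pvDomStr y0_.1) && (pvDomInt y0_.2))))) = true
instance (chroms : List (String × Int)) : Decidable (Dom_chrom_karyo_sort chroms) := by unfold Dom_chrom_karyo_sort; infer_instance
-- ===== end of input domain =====

set_option maxHeartbeats 1000000


-- B replaces A's two accumulator lists + two sorts + concatenation by ONE stable sort with a composite (group, secondary) key; return values proved equal.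

-- ===== PORT A =====
def check_special_chroms (name : String) : Int :=
  if name ∈ (["chr2A", "2A", "2a", "chr2a"] : List String) then 21
  else if name ∈ (["chr2B", "2B", "2b", "chr2b"] : List String) then 22
  else if name ∈ (["chrX", "X", "chrZ", "Z"] : List String) then 1000
  else if name ∈ (["chrY", "Y", "chrW", "W"] : List String) then 2000
  else if name ∈ (["chrM", "M", "chrMT", "MT"] : List String) then 3000
  else if name ∈ (["hs37d5"] : List String) then 4000
  else -1

def chrom_karyo_sort (chroms : List (String × Int)) : List (String × Int) :=
  let p := chroms.foldl
    (fun (acc : List (String × Int × Int) × List (String × Int × Int)) c =>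
      match PySem.Int.ofStr? (PySem.Str.stripChars (PySem.Str.lower c.1) "chr") with
      | some o => (acc.1 ++ [(c.1, c.2, o * 10)], acc.2)
      | none =>
        let o := check_special_chroms c.1
        if o > 0 then (acc.1 ++ [(c.1, c.2, o)], acc.2)
        else (acc.1, acc.2 ++ [(c.1, c.2, (-1 : Int))]))
    ([], [])
  let unordered := PySem.List.sorted p.2 (fun x => x.2.1) true
  let ordered := PySem.List.sorted p.1 (fun x => x.2.2) false
  (ordered ++ unordered).map (fun t => (t.1, t.2.1))

-- ===== PORT B =====
def pyKeyB (c : String × Int) : Int × Int :=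
  match PySem.Int.ofStr? (PySem.Str.stripChars (PySem.Str.lower c.1) "chr") with
  | some o => (0, o * 10)
  | none =>
    let spec := check_special_chroms c.1
    if spec > 0 then (0, spec) else (1, -c.2)

def chrom_karyo_sort_alt (chroms : List (String × Int)) : List (String × Int) :=
  (PySem.List.sorted2 chroms (fun c => (pyKeyB c).1) (fun c => (pyKeyB c).2) false).map
    (fun c => (c.1, c.2))

-- ===== PRECONDITION & SPEC =====
def Spec_chrom_karyo_sort (chroms : List (String × Int)) (out : List (String × Int)) : Prop := out = chrom_karyo_sort_alt chroms
instance (chroms : List (String × Int)) (out : List (String × Int)) : Decidable (Spec_chrom_karyo_sort chroms out) := by unfold Spec_chrom_karyo_sort; infer_instance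

-- ===== CLAIM (what is proved, stated in full; the proofs are below) =====
def Claim_equal_chrom_karyo_sort : Prop := ∀ (chroms : List (String × Int)), Dom_chrom_karyo_sort chroms → Spec_chrom_karyo_sort chroms (chrom_karyo_sort chroms)

-- ===== LEMMAS AND PROOFS =====

-- the two `before` predicates of the two sides, as used in this proof
def befS (a b : String × Int) : Bool := decide ((pyKeyB a).2 < (pyKeyB b).2)
def bef2 (a b : String × Int) : Bool :=
  decide ((pyKeyB a).1 < (pyKeyB b).1) ||
    (!decide ((pyKeyB b).1 < (pyKeyB a).1) && decide ((pyKeyB a).2 < (pyKeyB b).2))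

lemma pyKeyB_cases (c : String × Int) :
    (pyKeyB c).1 = 0 ∨ ((pyKeyB c).1 = 1 ∧ (pyKeyB c).2 = -c.2) := by
  unfold pyKeyB
  cases PySem.Int.ofStr? (PySem.Str.stripChars (PySem.Str.lower c.1) "chr") with
  | none => simp only; split_ifs <;> simp
  | some o => simp

lemma insertBy_append_of_false {α : Type} (bef : α → α → Bool) (x : α)
    (A B : List α) (hA : ∀ y ∈ A, bef x y = false) :
    PySem.List.insertBy bef x (A ++ B) = A ++ PySem.List.insertBy bef x B := by
  induction A with
  | nil => simp
  | cons a A ih =>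
    simp only [List.cons_append, PySem.List.insertBy]
    rw [hA a (by simp)]
    simp only [Bool.false_eq_true, if_false, List.cons.injEq, true_and]
    exact ih (fun y hy => hA y (by simp [hy]))

lemma insertBy_append_split {α : Type} (bef bef' : α → α → Bool) (x : α)
    (A B : List α) (hA : ∀ y ∈ A, bef x y = bef' x y) (hB : ∀ y ∈ B, bef x y = true) :
    PySem.List.insertBy bef x (A ++ B) = PySem.List.insertBy bef' x A ++ B := by
  induction A with
  | nil =>
    cases B with
    | nil => simp [PySem.List.insertBy]
    | cons b B =>
      simp only [List.nil_append, PySem.List.insertBy]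
      rw [hB b (by simp)]
      simp
  | cons a A ih =>
    simp only [List.cons_append, PySem.List.insertBy]
    rw [hA a (by simp)]
    by_cases h : bef' x a = true
    · simp [h]
    · simp only [Bool.not_eq_true] at h
      simp only [h, Bool.false_eq_true, if_false]
      exact congrArg (List.cons a) (ih (fun y hy => hA y (by simp [hy])))

lemma insertBy_congr_mem {α : Type} (bef bef' : α → α → Bool) (x : α) (B : List α)
    (h : ∀ y ∈ B, bef x y = bef' x y) :
    PySem.List.insertBy bef x B = PySem.List.insertBy bef' x B := by
  induction B with
  | nil => rfl
  | cons b B ih =>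
    simp only [PySem.List.insertBy]
    rw [h b (by simp)]
    by_cases hb : bef' x b = true
    · simp [hb]
    · simp only [Bool.not_eq_true] at hb
      simp only [hb, Bool.false_eq_true, if_false]
      exact congrArg (List.cons b) (ih (fun y hy => h y (by simp [hy])))

lemma insertBy_map {α β : Type} (f : α → β) (bef : β → β → Bool) (bef' : α → α → Bool)
    (h : ∀ a b, bef (f a) (f b) = bef' a b) (x : α) (ys : List α) :
    PySem.List.insertBy bef (f x) (ys.map f) = (PySem.List.insertBy bef' x ys).map f := by
  induction ys with
  | nil => simp [PySem.List.insertBy]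
  | cons y ys ih =>
    simp only [List.map_cons, PySem.List.insertBy, h]
    by_cases hy : bef' x y = true
    · simp [hy]
    · simp [hy, ih]

lemma foldl_insertBy_map {α β : Type} (f : α → β) (bef : β → β → Bool) (bef' : α → α → Bool)
    (h : ∀ a b, bef (f a) (f b) = bef' a b) (xs acc : List α) :
    (xs.map f).foldl (fun acc x => PySem.List.insertBy bef x acc) (acc.map f)
      = (xs.foldl (fun acc x => PySem.List.insertBy bef' x acc) acc).map f := by
  induction xs generalizing acc with
  | nil => simp
  | cons x xs ih =>
    simp only [List.map_cons, List.foldl_cons]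
    rw [insertBy_map f bef bef' h x acc]
    exact ih _

lemma foldl_insertBy_congr_mem {α : Type} (P : α → Prop) (bef bef' : α → α → Bool)
    (h : ∀ a b, P a → P b → bef a b = bef' a b) (xs acc : List α)
    (hacc : ∀ y ∈ acc, P y) (hxs : ∀ x ∈ xs, P x) :
    xs.foldl (fun acc x => PySem.List.insertBy bef x acc) acc
      = xs.foldl (fun acc x => PySem.List.insertBy bef' x acc) acc := by
  induction xs generalizing acc with
  | nil => rfl
  | cons x xs ih =>
    have hx : P x := hxs x (by simp)
    simp only [List.foldl_cons]
    rw [insertBy_congr_mem bef bef' x acc (fun y hy => h x y hx (hacc y hy))]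
    exact ih _ (fun y hy => by
        rcases (PySem.List.mem_insertBy _ _ _ _).1 hy with h1 | h2
        · exact h1 ▸ hx
        · exact hacc y h2)
      (fun y hy => hxs y (by simp [hy]))

-- characterisation of A's accumulator loop
lemma foldA_char (chroms : List (String × Int))
    (A0 B0 : List (String × Int × Int)) :
    chroms.foldl
      (fun (acc : List (String × Int × Int) × List (String × Int × Int)) c =>
        match PySem.Int.ofStr? (PySem.Str.stripChars (PySem.Str.lower c.1) "chr") with
        | some o => (acc.1 ++ [(c.1, c.2, o * 10)], acc.2)
        | none =>
          let o := check_special_chroms c.1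
          if o > 0 then (acc.1 ++ [(c.1, c.2, o)], acc.2)
          else (acc.1, acc.2 ++ [(c.1, c.2, (-1 : Int))]))
      (A0, B0)
    = (A0 ++ (chroms.filter (fun c => decide ((pyKeyB c).1 = 0))).map
          (fun c => (c.1, c.2, (pyKeyB c).2)),
       B0 ++ (chroms.filter (fun c => !decide ((pyKeyB c).1 = 0))).map
          (fun c => (c.1, c.2, (-1 : Int)))) := by
  induction chroms generalizing A0 B0 with
  | nil => simp
  | cons c cs ih =>
    simp only [List.foldl_cons, List.filter_cons]
    cases h : PySem.Int.ofStr? (PySem.Str.stripChars (PySem.Str.lower c.1) "chr") with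
    | some o =>
      have hk : pyKeyB c = (0, o * 10) := by unfold pyKeyB; rw [h]
      simp only [hk]
      rw [ih]
      simp [hk]
    | none =>
      by_cases hs : check_special_chroms c.1 > 0
      · have hk : pyKeyB c = (0, check_special_chroms c.1) := by
          unfold pyKeyB; rw [h]; simp [hs]
        simp only [hs, if_true, hk]
        rw [ih]
        simp [hk]
      · have hk : pyKeyB c = (1, -c.2) := by
          unfold pyKeyB; rw [h]; simp [hs]
        simp only [hs, if_false, hk]
        rw [ih]
        simp

-- stable lex sort with a {0,1}-valued first key splits into the two filtered stable sorts
lemma splitFold (xs : List (String × Int)) (accA accB : List (String × Int))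
    (hA : ∀ y ∈ accA, (pyKeyB y).1 = 0) (hB : ∀ y ∈ accB, (pyKeyB y).1 = 1) :
    xs.foldl (fun acc x => PySem.List.insertBy bef2 x acc) (accA ++ accB)
      = (xs.filter (fun c => decide ((pyKeyB c).1 = 0))).foldl
          (fun acc x => PySem.List.insertBy befS x acc) accA
        ++ (xs.filter (fun c => !decide ((pyKeyB c).1 = 0))).foldl
          (fun acc x => PySem.List.insertBy befS x acc) accB := by
  induction xs generalizing accA accB with
  | nil => simp
  | cons x xs ih =>
    simp only [List.foldl_cons, List.filter_cons]
    rcases pyKeyB_cases x with hx | ⟨hx, _⟩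
    · have hstep : PySem.List.insertBy bef2 x (accA ++ accB)
          = PySem.List.insertBy befS x accA ++ accB := by
        apply insertBy_append_split
        · intro y hy
          unfold bef2 befS
          rw [hx, hA y hy]
          simp
        · intro y hy
          unfold bef2
          rw [hx, hB y hy]
          simp
      rw [hstep]
      have hc : decide ((pyKeyB x).1 = 0) = true := by rw [hx]; decide
      simp only [hc, Bool.not_true, Bool.false_eq_true, if_false, if_true, List.foldl_cons]
      exact ih (PySem.List.insertBy befS x accA) accB
        (fun y hy => by
          rcases (PySem.List.mem_insertBy _ _ _ _).1 hy with h1 | h2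
          · exact h1 ▸ hx
          · exact hA y h2) hB
    · have hne : ¬ ((pyKeyB x).1 = 0) := by rw [hx]; decide
      have hstep : PySem.List.insertBy bef2 x (accA ++ accB)
          = accA ++ PySem.List.insertBy befS x accB := by
        rw [insertBy_append_of_false bef2 x accA accB
          (fun y hy => by unfold bef2; rw [hx, hA y hy]; simp)]
        exact congrArg (fun l => accA ++ l)
          (insertBy_congr_mem bef2 befS x accB (fun y hy => by
            unfold bef2 befS
            rw [hx, hB y hy]
            simp))
      rw [hstep]
      have hc : decide ((pyKeyB x).1 = 0) = false := by rw [hx]; decide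
      simp only [hc, Bool.not_false, Bool.false_eq_true, if_false, if_true, List.foldl_cons]
      exact ih accA (PySem.List.insertBy befS x accB) hA
        (fun y hy => by
          rcases (PySem.List.mem_insertBy _ _ _ _).1 hy with h1 | h2
          · exact h1 ▸ hx
          · exact hB y h2)

-- ===== VERDICT (by name: the statement is the Claim_ definition above) =====
theorem chrom_karyo_sort_spec : Claim_equal_chrom_karyo_sort := by
  intro chroms _
  unfold Spec_chrom_karyo_sort chrom_karyo_sort chrom_karyo_sort_alt
  rw [foldA_char]
  simp only [List.nil_append]
  set f0 := chroms.filter (fun c => decide ((pyKeyB c).1 = 0)) with hf0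
  set f1 := chroms.filter (fun c => !decide ((pyKeyB c).1 = 0)) with hf1
  -- B side: sorted2 is the lex foldl; split it
  have hB2 : PySem.List.sorted2 chroms (fun c => (pyKeyB c).1) (fun c => (pyKeyB c).2) false
      = chroms.foldl (fun acc x => PySem.List.insertBy bef2 x acc) [] := by
    simp only [PySem.List.sorted2]
    rfl
  have hsplit := splitFold chroms [] [] (by simp) (by simp)
  simp only [List.nil_append] at hsplit
  -- A side, ordered part: sort of the mapped list commutes with the map
  have hOrd : PySem.List.sorted
        (f0.map (fun c => (c.1, c.2, (pyKeyB c).2))) (fun x => x.2.2) false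
      = (f0.foldl (fun acc x => PySem.List.insertBy befS x acc) []).map
        (fun c => (c.1, c.2, (pyKeyB c).2)) := by
    rw [PySem.List.sorted_eq_foldl_insertBy]
    have := foldl_insertBy_map (fun c => (c.1, c.2, (pyKeyB c).2))
      (fun a b => decide (a.2.2 < b.2.2)) befS (by intro a b; simp [befS]) f0 []
    simpa using this
  -- A side, unordered part: reverse sort by size of the mapped list
  have hUn : PySem.List.sorted
        (f1.map (fun c => (c.1, c.2, (-1 : Int)))) (fun x => x.2.1) true
      = (f1.foldl (fun acc x => PySem.List.insertBy befS x acc) []).map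
        (fun c => (c.1, c.2, (-1 : Int))) := by
    rw [PySem.List.sorted_rev_eq_foldl_insertBy]
    have hmap := foldl_insertBy_map (fun c : String × Int => (c.1, c.2, (-1 : Int)))
      (fun a b => decide (b.2.1 < a.2.1)) (fun a b => decide (b.2 < a.2))
      (by intro a b; simp) f1 []
    simp only [List.map_nil] at hmap
    rw [hmap]
    refine congrArg (List.map (fun c : String × Int => (c.1, c.2, (-1 : Int)))) ?_
    apply foldl_insertBy_congr_mem (fun c => (pyKeyB c).1 = 1)
    · intro a b ha hb
      have ha2 : (pyKeyB a).2 = -a.2 := by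
        rcases pyKeyB_cases a with h | ⟨_, h⟩
        · rw [h] at ha; exact absurd ha (by decide)
        · exact h
      have hb2 : (pyKeyB b).2 = -b.2 := by
        rcases pyKeyB_cases b with h | ⟨_, h⟩
        · rw [h] at hb; exact absurd hb (by decide)
        · exact h
      unfold befS
      rw [ha2, hb2]
      exact decide_eq_decide.2 (by omega)
    · simp
    · intro y hy
      have hy' : ¬ ((pyKeyB y).1 = 0) := by
        have := List.of_mem_filter (hf1 ▸ hy)
        simpa using this
      rcases pyKeyB_cases y with h | ⟨h, _⟩
      · exact absurd h hy'
      · exact h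
  rw [hOrd, hUn, hB2, hsplit, ← hf0, ← hf1]
  simp [List.map_map, Function.comp_def]
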